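-- pv_equiv track=rewrite | github.com/manolobkno08/ACME | classes/file.py | final_comparison
-- ===== SOURCE A (Python) =====
-- def final_comparison(final_dict):
--     """Method that return a final comparison between employees"""
--     final = {}
--
--     visited = []
--     for user1, days1 in final_dict.items():
--         visited.append(user1)
--         for user2, days2 in final_dict.items():
--             if user2 not in visited:
--                 common_days = days1.keys() & days2.keys()
--                 count = 0
--                 for day in common_days:
--                     start_user1, end_user1 = days1[day]
--                     start_user2, end_user2 = days2[day]
--                     if start_user2 > end_user1:
--                         continue
--                     elif end_user2 < start_user1:
--                         continue
--                     else:
--                         count += 1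
--                 if count > 0:
--                     key = user1 + "-" + user2
--                     final[key] = count
--     return final
-- ===== SOURCE B (Python) =====
-- def final_comparison(final_dict):
--     """Day-major re-implementation: invert the schedule into a day -> present-employees
--     index, count each pair's overlapping days day by day, then emit pairs in the
--     original employee order."""
--     items = list(final_dict.items())
--
--     # inverted index: day -> indices (in insertion order) of employees scheduled that day
--     day_index = {}
--     for i, (_, days) in enumerate(items):
--         for day in days:
--             day_index.setdefault(day, []).append(i)
--
--     # accumulate, day by day, the number of overlapping common days of every pair
--     counts = {}
--     for day, present in day_index.items():
--         rest = present
--         while rest: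
--             i, rest = rest[0], rest[1:]
--             start1, end1 = items[i][1][day]
--             for j in rest:
--                 start2, end2 = items[j][1][day]
--                 if start2 <= end1 and end2 >= start1:
--                     counts[(i, j)] = counts.get((i, j), 0) + 1
--
--     # emit the positive pairs in the original (earlier, later) employee order
--     result = {}
--     todo = list(enumerate(items))
--     while todo:
--         (i, (user1, _)), todo = todo[0], todo[1:]
--         for j, (user2, _) in todo:
--             c = counts.get((i, j), 0)
--             if c > 0:
--                 result[user1 + "-" + user2] = c
--     return result
-- ===== Notes on version B (the rewrite author's own statement) =====
-- stated objective: faster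
-- what changed: A scans every employee pair and intersects their full day sets; B inverts the schedule once into a day -> present-employees index, accumulates each pair's overlap count day by day in a counts dict, then emits positive pairs in the original employee order.
import Mathlib
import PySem

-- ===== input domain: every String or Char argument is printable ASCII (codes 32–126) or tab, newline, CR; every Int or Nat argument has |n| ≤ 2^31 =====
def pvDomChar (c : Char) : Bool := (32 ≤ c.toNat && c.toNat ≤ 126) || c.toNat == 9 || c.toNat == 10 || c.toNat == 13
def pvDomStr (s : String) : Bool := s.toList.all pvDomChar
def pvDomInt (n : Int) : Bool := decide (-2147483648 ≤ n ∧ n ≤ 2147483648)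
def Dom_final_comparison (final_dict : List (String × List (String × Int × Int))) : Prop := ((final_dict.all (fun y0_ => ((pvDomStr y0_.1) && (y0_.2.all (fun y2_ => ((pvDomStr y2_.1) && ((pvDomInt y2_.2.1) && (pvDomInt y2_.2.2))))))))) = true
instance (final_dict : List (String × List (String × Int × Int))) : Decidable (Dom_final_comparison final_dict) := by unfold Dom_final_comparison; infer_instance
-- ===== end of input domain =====

-- B replaces A's per-pair day-set intersections with a day-inverted index: it counts each
-- pair's overlapping days day by day and then emits the positive pairs in the original
-- employee order (objective: faster, measured; same exact result).


-- ===== PORT A =====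
-- inner 'for user2, days2 in final_dict.items():' loop of A, kept as a named helper
def pvInnerA (final_dict : List (String × List (String × Int × Int))) (visited : List String)
    (p : String × List (String × Int × Int)) (final : PySem.Dict String Int) : PySem.Dict String Int :=
  final_dict.foldl
    (fun (final : PySem.Dict String Int) (q : String × List (String × Int × Int)) =>
      if q.1 ∈ visited then final
      else
        let days1 := PySem.Dict.mk p.2
        let days2 := PySem.Dict.mk q.2
        let common_days := PySem.Set.inter (PySem.Set.ofList days1.keys) (PySem.Set.ofList days2.keys)
        let count := common_days.foldl
          (fun (count : Int) (day : String) =>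
            let se1 := days1.getD day (0, 0)
            let se2 := days2.getD day (0, 0)
            if se2.1 > se1.2 then count
            else if se2.2 < se1.1 then count
            else count + 1) 0
        if count > 0 then final.insert (p.1 ++ "-" ++ q.1) count else final)
    final

def final_comparison (final_dict : List (String × List (String × Int × Int))) : List (String × Int) :=
  (final_dict.foldl
    (fun (st : PySem.Dict String Int × List String) (p : String × List (String × Int × Int)) =>
      let visited := st.2 ++ [p.1]
      (pvInnerA final_dict visited p st.1, visited))
    (PySem.Dict.empty, [])).1.items

-- ===== PORT B =====
-- B's 'while rest:' pair loop over the employees present on one day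
def pvPairLoop (items : List (String × List (String × Int × Int))) (day : String) :
    PySem.Dict (Int × Int) Int → List Int → PySem.Dict (Int × Int) Int
  | counts, [] => counts
  | counts, i :: rest =>
    let se1 := (PySem.Dict.mk (PySem.List.pyGetD items i ("", [])).2).getD day (0, 0)
    let counts := rest.foldl
      (fun (counts : PySem.Dict (Int × Int) Int) (j : Int) =>
        let se2 := (PySem.Dict.mk (PySem.List.pyGetD items j ("", [])).2).getD day (0, 0)
        if se2.1 ≤ se1.2 ∧ se2.2 ≥ se1.1 then counts.insert (i, j) (counts.getD (i, j) 0 + 1)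
        else counts)
      counts
    pvPairLoop items day counts rest

-- B's 'while todo:' emission loop
def pvEmit (counts : PySem.Dict (Int × Int) Int) :
    PySem.Dict String Int → List (Int × (String × List (String × Int × Int))) → PySem.Dict String Int
  | result, [] => result
  | result, ip :: todo =>
    let result := todo.foldl
      (fun (result : PySem.Dict String Int) (jq : Int × (String × List (String × Int × Int))) =>
        let c := counts.getD (ip.1, jq.1) 0
        if c > 0 then result.insert (ip.2.1 ++ "-" ++ jq.2.1) c else result)
      result
    pvEmit counts result todo

def final_comparison_alt (final_dict : List (String × List (String × Int × Int))) : List (String × Int) :=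
  let items := final_dict
  let dayIndex : PySem.Dict String (List Int) :=
    (PySem.List.enumerate items).foldl
      (fun di ip =>
        ip.2.2.foldl (fun (di : PySem.Dict String (List Int)) dp => di.modify dp.1 [] (· ++ [ip.1])) di)
      PySem.Dict.empty
  let counts := dayIndex.items.foldl
    (fun (counts : PySem.Dict (Int × Int) Int) dp => pvPairLoop items dp.1 counts dp.2)
    PySem.Dict.empty
  (pvEmit counts PySem.Dict.empty (PySem.List.enumerate items)).items

-- ===== PRECONDITION & SPEC =====
-- Pre_ excludes association lists with a duplicate outer (user) key or a duplicate day key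
-- inside one user's schedule: such lists do not arise from a Python dict, on which duplicate
-- keys would already have been collapsed (last value wins) before A is called.
def Pre_final_comparison (final_dict : List (String × List (String × Int × Int))) : Prop :=
  (final_dict.map (·.1)).Nodup ∧ ∀ p ∈ final_dict, (p.2.map (·.1)).Nodup
instance (final_dict : List (String × List (String × Int × Int))) : Decidable (Pre_final_comparison final_dict) := by unfold Pre_final_comparison; infer_instance

def pvWitness_final_comparison : (List (String × List (String × Int × Int))) :=
  [("ana", [("mon", 1, 3), ("tue", 0, 2)]), ("bob", [("mon", 2, 5)]), ("cyd", [("wed", 1, 1)])]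

def Spec_final_comparison (final_dict : List (String × List (String × Int × Int))) (out : List (String × Int)) : Prop := out = final_comparison_alt final_dict
instance (final_dict : List (String × List (String × Int × Int))) (out : List (String × Int)) : Decidable (Spec_final_comparison final_dict out) := by unfold Spec_final_comparison; infer_instance

-- ===== CLAIM (what is proved, stated in full; the proofs are below) =====
def Claim_equal_final_comparison : Prop := ∀ (final_dict : List (String × List (String × Int × Int))), Dom_final_comparison final_dict → Pre_final_comparison final_dict → Spec_final_comparison final_dict (final_comparison final_dict)

-- ===== LEMMAS AND PROOFS =====

-- day keys of one schedule
def pvKeys (d : List (String × Int × Int)) : List String := d.map (·.1)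

-- the two schedules overlap on 'day' (presence of the day is checked by the caller)
def pvHit (d1 d2 : List (String × Int × Int)) (day : String) : Bool :=
  let se1 := (PySem.Dict.mk d1).getD day (0, 0)
  let se2 := (PySem.Dict.mk d2).getD day (0, 0)
  decide (se2.1 ≤ se1.2 ∧ se2.2 ≥ se1.1)

-- number of common overlapping days of two schedules
def pvCnt (d1 d2 : List (String × Int × Int)) : Int :=
  (((pvKeys d1).filter (fun day => decide (day ∈ pvKeys d2))).countP (pvHit d1 d2) : Int)

-- the overlap test of B at two indices
def pvHitAt (items : List (String × List (String × Int × Int))) (day : String) (i j : Int) : Bool :=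
  pvHit (PySem.List.pyGetD items i ("", [])).2 (PySem.List.pyGetD items j ("", [])).2 day

-- canonical sequence of (key, count) pairs, in the emission order shared by both programs
def pvSeq : List (String × List (String × Int × Int)) → List (String × Int)
  | [] => []
  | p :: s =>
    (s.filterMap (fun q => if pvCnt p.2 q.2 > 0 then some (p.1 ++ "-" ++ q.1, pvCnt p.2 q.2) else none))
      ++ pvSeq s

def pvIns (d : PySem.Dict String Int) (kv : String × Int) : PySem.Dict String Int := d.insert kv.1 kv.2

def pvBuildDI (l : List (Int × (String × List (String × Int × Int)))) (di : PySem.Dict String (List Int)) :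
    PySem.Dict String (List Int) :=
  l.foldl
    (fun di ip =>
      ip.2.2.foldl (fun (di : PySem.Dict String (List Int)) dp => di.modify dp.1 [] (· ++ [ip.1])) di)
    di

theorem pv_enum_snd {α : Type} (xs : List α) (k : Int) :
    (PySem.List.enumerate xs k).map (·.2) = xs := by
  induction xs generalizing k <;> simp_all [PySem.List.enumerate]

theorem pv_enum_mem {α : Type} (xs : List α) (k : Int) (ip : Int × α)
    (h : ip ∈ PySem.List.enumerate xs k) :
    ∃ n : Nat, ip.1 = k + (n : Int) ∧ xs[n]? = some ip.2 := by
  induction xs generalizing k with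
  | nil => simp [PySem.List.enumerate] at h
  | cons x t ih =>
    rw [show PySem.List.enumerate (x :: t) k = (k, x) :: PySem.List.enumerate t (k+1) from rfl] at h
    rcases List.mem_cons.mp h with h | h
    · exact ⟨0, by simp [h]⟩
    · obtain ⟨n, hn1, hn2⟩ := ih (k+1) h
      exact ⟨n+1, by push_cast; omega, by simpa using hn2⟩

theorem pv_enum_pairwise {α : Type} (xs : List α) (k : Int) :
    (PySem.List.enumerate xs k).Pairwise (fun a b => a.1 < b.1) := by
  induction xs generalizing k with
  | nil => exact List.Pairwise.nil
  | cons x t ih =>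
    rw [show PySem.List.enumerate (x :: t) k = (k, x) :: PySem.List.enumerate t (k+1) from rfl]
    refine List.Pairwise.cons ?_ (ih (k+1))
    intro y hy
    obtain ⟨n, hn1, _⟩ := pv_enum_mem t (k+1) y hy
    simp only []
    omega

theorem pv_enum_getD {α : Type} (xs : List α) (ip : Int × α) (d : α)
    (h : ip ∈ PySem.List.enumerate xs 0) :
    PySem.List.pyGetD xs ip.1 d = ip.2 := by
  obtain ⟨n, hn1, hn2⟩ := pv_enum_mem xs 0 ip h
  have hlt : (n : Int) < xs.length := by
    have := List.getElem?_eq_some_iff.mp hn2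
    exact_mod_cast this.1
  rw [hn1]
  simp only [zero_add]
  rw [PySem.List.pyGetD_eq_getElem xs d (by positivity) hlt]
  have := List.getElem?_eq_some_iff.mp hn2
  obtain ⟨hh, he⟩ := this
  simp only [Int.toNat_natCast]
  exact he

theorem pv_enum_inj {α : Type} (xs : List α) (k i : Int) (p q : α)
    (h1 : (i, p) ∈ PySem.List.enumerate xs k) (h2 : (i, q) ∈ PySem.List.enumerate xs k) :
    p = q := by
  obtain ⟨n, hn1, hn2⟩ := pv_enum_mem xs k (i, p) h1
  obtain ⟨m, hm1, hm2⟩ := pv_enum_mem xs k (i, q) h2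
  have : n = m := by omega
  subst this
  rw [hn2] at hm2
  exact Option.some_inj.mp hm2

theorem pv_di_one (ip : Int × (String × List (String × Int × Int)))
    (di : PySem.Dict String (List Int)) (day : String) (hnd : (pvKeys ip.2.2).Nodup) :
    (ip.2.2.foldl (fun (di : PySem.Dict String (List Int)) dp => di.modify dp.1 [] (· ++ [ip.1])) di).getD day []
      = di.getD day [] ++ (if day ∈ pvKeys ip.2.2 then [ip.1] else []) := by
  have h1 : ip.2.2.foldl (fun (di : PySem.Dict String (List Int)) dp => di.modify dp.1 [] (· ++ [ip.1])) di
      = (ip.2.2.map (fun dp => (dp.1, ip.1))).foldl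
          (fun (di : PySem.Dict String (List Int)) pr => di.modify pr.1 [] (· ++ [pr.2])) di := by
    rw [List.foldl_map]
  rw [h1, PySem.Dict.getD_foldl_modify_append]
  congr 1
  have h2 : ((ip.2.2.map (fun dp => (dp.1, ip.1))).filter (fun p => p.1 == day)).map (·.2)
      = ((pvKeys ip.2.2).filter (fun x => x == day)).map (fun _ => ip.1) := by
    rw [List.filter_map]
    rw [List.map_map, pvKeys, List.filter_map]
    rw [List.map_map]
    congr 1
  rw [h2, List.filter_beq]
  by_cases hmem : day ∈ pvKeys ip.2.2
  · rw [List.count_eq_one_of_mem hnd hmem, if_pos hmem]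
    rfl
  · rw [List.count_eq_zero_of_not_mem hmem, if_neg hmem]
    rfl

theorem pv_di_getD (l : List (Int × (String × List (String × Int × Int))))
    (di : PySem.Dict String (List Int)) (day : String)
    (hnd : ∀ ip ∈ l, (pvKeys ip.2.2).Nodup) :
    (pvBuildDI l di).getD day []
      = di.getD day [] ++ l.filterMap (fun ip => if day ∈ pvKeys ip.2.2 then some ip.1 else none) := by
  induction l generalizing di with
  | nil => simp [pvBuildDI]
  | cons ip t ih =>
    rw [pvBuildDI, List.foldl_cons, ← pvBuildDI, ih _ (fun x hx => hnd x (List.mem_cons_of_mem _ hx))]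
    rw [pv_di_one ip di day (hnd ip List.mem_cons_self)]
    rw [List.filterMap_cons]
    by_cases hmem : day ∈ pvKeys ip.2.2
    · rw [if_pos hmem, if_pos hmem, List.append_assoc]
      rfl
    · rw [if_neg hmem, if_neg hmem, List.append_nil]

theorem pv_di_nodup (l : List (Int × (String × List (String × Int × Int))))
    (di : PySem.Dict String (List Int)) (h : di.keys.Nodup) :
    (pvBuildDI l di).keys.Nodup := by
  induction l generalizing di with
  | nil => exact h
  | cons ip t ih =>
    rw [pvBuildDI, List.foldl_cons, ← pvBuildDI]
    exact ih _ (PySem.Dict.nodup_keys_foldl_modify_key ip.2.2 (·.1) []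
      (fun _ _ => (· ++ [ip.1])) di h)

theorem pv_di_mem_keys (l : List (Int × (String × List (String × Int × Int))))
    (di : PySem.Dict String (List Int)) (day : String)
    (hnd : ∀ ip ∈ l, (pvKeys ip.2.2).Nodup)
    (ip : Int × (String × List (String × Int × Int))) (hip : ip ∈ l) (hday : day ∈ pvKeys ip.2.2) :
    day ∈ (pvBuildDI l di).keys := by
  by_contra hno
  have hc : (pvBuildDI l di).contains day = false := by
    rw [PySem.Dict.contains_eq_decide_mem_keys]
    simpa using hno
  have := PySem.Dict.getD_of_not_contains (pvBuildDI l di) ([] : List Int) hc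
  rw [pv_di_getD l di day hnd] at this
  have : l.filterMap (fun ip => if day ∈ pvKeys ip.2.2 then some ip.1 else none) = [] := by
    rcases List.append_eq_nil_iff.mp this with ⟨_, h2⟩
    exact h2
  have hmem : ip.1 ∈ l.filterMap (fun ip => if day ∈ pvKeys ip.2.2 then some ip.1 else none) := by
    exact List.mem_filterMap.mpr ⟨ip, hip, by rw [if_pos hday]⟩
  rw [this] at hmem
  exact List.not_mem_nil hmem

theorem pv_pair_inner (items : List (String × List (String × Int × Int))) (day : String)
    (i a b : Int) (rest : List Int) (c : PySem.Dict (Int × Int) Int) (hnd : rest.Nodup) :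
    (rest.foldl
      (fun (counts : PySem.Dict (Int × Int) Int) (j : Int) =>
        let se2 := (PySem.Dict.mk (PySem.List.pyGetD items j ("", [])).2).getD day (0, 0)
        if se2.1 ≤ ((PySem.Dict.mk (PySem.List.pyGetD items i ("", [])).2).getD day (0, 0)).2
            ∧ se2.2 ≥ ((PySem.Dict.mk (PySem.List.pyGetD items i ("", [])).2).getD day (0, 0)).1
        then counts.insert (i, j) (counts.getD (i, j) 0 + 1)
        else counts)
      c).getD (a, b) 0
    = c.getD (a, b) 0 + (if i = a ∧ b ∈ rest ∧ pvHitAt items day a b = true then 1 else 0) := by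
  induction rest generalizing c with
  | nil => simp
  | cons j t ih =>
    rw [List.foldl_cons, ih _ (List.nodup_cons.mp hnd).2]
    simp only []
    by_cases hij : i = a ∧ j = b
    · obtain ⟨hia, hjb⟩ := hij
      subst hia
      rw [hjb]
      have hbt : b ∉ t := hjb ▸ (List.nodup_cons.mp hnd).1
      by_cases htest : ((PySem.Dict.mk (PySem.List.pyGetD items b ("", [])).2).getD day (0, 0)).1
            ≤ ((PySem.Dict.mk (PySem.List.pyGetD items i ("", [])).2).getD day (0, 0)).2
          ∧ ((PySem.Dict.mk (PySem.List.pyGetD items b ("", [])).2).getD day (0, 0)).2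
            ≥ ((PySem.Dict.mk (PySem.List.pyGetD items i ("", [])).2).getD day (0, 0)).1
      · rw [if_pos htest, PySem.Dict.getD_insert]
        rw [if_pos rfl]
        have hhit : pvHitAt items day i b = true := by
          simp only [pvHitAt, pvHit, decide_eq_true_eq]
          exact htest
        rw [if_neg (by
          rintro ⟨_, hbt', _⟩
          exact hbt hbt'), if_pos ⟨rfl, List.mem_cons_self, hhit⟩]
        omega
      · rw [if_neg htest]
        have hhit : ¬ pvHitAt items day i b = true := by
          simp only [pvHitAt, pvHit, decide_eq_true_eq]
          exact htest
        rw [if_neg (by rintro ⟨_, _, h⟩; exact hhit h), if_neg (by rintro ⟨_, _, h⟩; exact hhit h)]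
    · have hkey : ¬ ((a, b) = (i, j)) := by
        intro he
        exact hij ⟨(Prod.mk.injEq _ _ _ _ ▸ he).1.symm ▸ rfl, (Prod.ext_iff.mp he).2.symm⟩
      have hgd : ∀ (c' : PySem.Dict (Int × Int) Int),
          ((if ((PySem.Dict.mk (PySem.List.pyGetD items j ("", [])).2).getD day (0, 0)).1
              ≤ ((PySem.Dict.mk (PySem.List.pyGetD items i ("", [])).2).getD day (0, 0)).2
            ∧ ((PySem.Dict.mk (PySem.List.pyGetD items j ("", [])).2).getD day (0, 0)).2
              ≥ ((PySem.Dict.mk (PySem.List.pyGetD items i ("", [])).2).getD day (0, 0)).1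
          then c'.insert (i, j) (c'.getD (i, j) 0 + 1) else c')).getD (a, b) 0 = c'.getD (a, b) 0 := by
        intro c'
        split_ifs with ht
        · rw [PySem.Dict.getD_insert, if_neg hkey]
        · rfl
      rw [hgd]
      by_cases hia : i = a
      · subst hia
        have hjb : j ≠ b := fun hh => hij ⟨rfl, hh⟩
        congr 1
        apply if_congr ?_ rfl rfl
        constructor
        · rintro ⟨hi', hb, hh⟩
          exact ⟨hi', List.mem_cons_of_mem _ hb, hh⟩
        · rintro ⟨hi', hb, hh⟩
          rcases List.mem_cons.mp hb with he | hb'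
          · exact absurd he.symm hjb
          · exact ⟨hi', hb', hh⟩
      · rw [if_neg (by rintro ⟨h, _, _⟩; exact hia h), if_neg (by rintro ⟨h, _, _⟩; exact hia h)]

theorem pv_pairLoop_getD (items : List (String × List (String × Int × Int))) (day : String)
    (ps : List Int) (a b : Int) (hab : a < b) (hps : ps.Pairwise (· < ·))
    (c : PySem.Dict (Int × Int) Int) :
    (pvPairLoop items day c ps).getD (a, b) 0
      = c.getD (a, b) 0 + (if a ∈ ps ∧ b ∈ ps ∧ pvHitAt items day a b = true then 1 else 0) := by
  induction ps generalizing c with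
  | nil => simp [pvPairLoop]
  | cons i rest ih =>
    obtain ⟨hilt, hrest⟩ := List.pairwise_cons.mp hps
    have hndrest : rest.Nodup := hrest.imp (fun h => ne_of_lt h)
    rw [pvPairLoop]
    rw [ih hrest _]
    rw [pv_pair_inner items day i a b rest c hndrest]
    by_cases hia : i = a
    · subst hia
      have hanotin : i ∉ rest := fun hmem => lt_irrefl i (hilt i hmem)
      by_cases hb : b ∈ rest ∧ pvHitAt items day i b = true
      · rw [if_pos ⟨rfl, hb.1, hb.2⟩, if_neg (fun h => hanotin h.1),
            if_pos ⟨List.mem_cons_self, List.mem_cons_of_mem _ hb.1, hb.2⟩]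
        omega
      · rw [if_neg (by rintro ⟨_, h1, h2⟩; exact hb ⟨h1, h2⟩),
            if_neg (fun h => hanotin h.1),
            if_neg (by
              rintro ⟨_, h1, h2⟩
              rcases List.mem_cons.mp h1 with he | h1'
              · omega
              · exact hb ⟨h1', h2⟩)]
        omega
    · rw [if_neg (by rintro ⟨h, _, _⟩; exact hia h)]
      by_cases hbi : b = i
      · subst hbi
        rw [if_neg (by
            rintro ⟨_, hb', _⟩
            have := hilt b hb'
            omega),
          if_neg (by
            rintro ⟨ha', hb', _⟩
            rcases List.mem_cons.mp ha' with he | ha''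
            · exact hia he.symm
            · have := hilt a ha''
              omega)]
        omega
      · have hiff : (if a ∈ rest ∧ b ∈ rest ∧ pvHitAt items day a b = true then (1 : Int) else 0)
            = (if a ∈ i :: rest ∧ b ∈ i :: rest ∧ pvHitAt items day a b = true then 1 else 0) := by
          apply if_congr ?_ rfl rfl
          constructor
          · rintro ⟨h1, h2, h3⟩
            exact ⟨List.mem_cons_of_mem _ h1, List.mem_cons_of_mem _ h2, h3⟩
          · rintro ⟨h1, h2, h3⟩
            rcases List.mem_cons.mp h1 with he | h1'
            · exact absurd he (fun hh => hia hh.symm)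
            · rcases List.mem_cons.mp h2 with he2 | h2'
              · exact absurd he2 hbi
              · exact ⟨h1', h2', h3⟩
        rw [hiff]
        omega

theorem pv_counts_fold (items : List (String × List (String × Int × Int)))
    (P : String → List Int) (K : List String) (a b : Int) (hab : a < b)
    (hP : ∀ day ∈ K, (P day).Pairwise (· < ·)) (c : PySem.Dict (Int × Int) Int) :
    (K.foldl (fun c day => pvPairLoop items day c (P day)) c).getD (a, b) 0
      = c.getD (a, b) 0
        + (K.countP (fun day => decide (a ∈ P day ∧ b ∈ P day ∧ pvHitAt items day a b = true)) : Int) := by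
  induction K generalizing c with
  | nil => simp
  | cons day K' ih =>
    rw [List.foldl_cons, ih (fun d hd => hP d (List.mem_cons_of_mem _ hd))]
    rw [pv_pairLoop_getD items day (P day) a b hab (hP day List.mem_cons_self) c]
    rw [List.countP_cons]
    by_cases hd : a ∈ P day ∧ b ∈ P day ∧ pvHitAt items day a b = true
    · rw [if_pos hd]
      simp only [decide_eq_true_eq, if_pos hd]
      push_cast
      omega
    · rw [if_neg hd]
      simp only [decide_eq_true_eq, if_neg hd]
      push_cast
      omega

theorem pv_countP_transfer (K ks : List String) (f : String → Bool)
    (hK : K.Nodup) (hks : ks.Nodup) (hsub : ∀ x ∈ ks, x ∈ K) :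
    K.countP (fun x => decide (x ∈ ks) && f x) = ks.countP f := by
  rw [List.countP_eq_length_filter, List.countP_eq_length_filter]
  have hperm : (K.filter (fun x => decide (x ∈ ks) && f x)).Perm (ks.filter f) := by
    apply List.perm_of_nodup_nodup_toFinset_eq (hK.filter _) (hks.filter _)
    ext x
    simp only [List.mem_toFinset, List.mem_filter, Bool.and_eq_true, decide_eq_true_eq]
    constructor
    · rintro ⟨_, hx, hf⟩
      exact ⟨hx, hf⟩
    · rintro ⟨hx, hf⟩
      exact ⟨hsub x hx, hx, hf⟩
  exact hperm.length_eq

def pvPresent (items : List (String × List (String × Int × Int))) (day : String) : List Int :=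
  (PySem.List.enumerate items).filterMap (fun ip => if day ∈ pvKeys ip.2.2 then some ip.1 else none)

theorem pv_present_pairwise (items : List (String × List (String × Int × Int))) (day : String) :
    (pvPresent items day).Pairwise (· < ·) := by
  apply List.Pairwise.filterMap _ _ (pv_enum_pairwise items 0)
  intro x y hxy i hi j hj
  have hx : i = x.1 := by
    by_cases h : day ∈ pvKeys x.2.2
    · rw [if_pos h] at hi; exact (Option.some_inj.mp hi).symm
    · rw [if_neg h] at hi; cases hi
  have hy : j = y.1 := by
    by_cases h : day ∈ pvKeys y.2.2
    · rw [if_pos h] at hj; exact (Option.some_inj.mp hj).symm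
    · rw [if_neg h] at hj; cases hj
  rw [hx, hy]
  exact hxy

theorem pv_present_mem (items : List (String × List (String × Int × Int))) (day : String)
    (i : Int) (p : String × List (String × Int × Int))
    (h : (i, p) ∈ PySem.List.enumerate items 0) :
    i ∈ pvPresent items day ↔ day ∈ pvKeys p.2 := by
  constructor
  · intro hmem
    obtain ⟨x, hx, hfx⟩ := List.mem_filterMap.mp hmem
    by_cases hd : day ∈ pvKeys x.2.2
    · rw [if_pos hd] at hfx
      have hx1 : x.1 = i := Option.some_inj.mp hfx
      have : x.2 = p := by
        apply pv_enum_inj items 0 i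
        · rw [← hx1]; exact hx
        · exact h
      rw [← this]
      exact hd
    · rw [if_neg hd] at hfx; cases hfx
  · intro hd
    exact List.mem_filterMap.mpr ⟨(i, p), h, by rw [if_pos hd]⟩

theorem pv_enum_mem_snd {α : Type} (xs : List α) (k : Int) (ip : Int × α)
    (h : ip ∈ PySem.List.enumerate xs k) : ip.2 ∈ xs := by
  obtain ⟨n, _, hn⟩ := pv_enum_mem xs k ip h
  exact List.mem_of_getElem? hn

def pvDI (items : List (String × List (String × Int × Int))) : PySem.Dict String (List Int) :=
  pvBuildDI (PySem.List.enumerate items) PySem.Dict.empty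

theorem pv_di_getD_present (items : List (String × List (String × Int × Int))) (day : String)
    (hnd : ∀ q ∈ items, (pvKeys q.2).Nodup) :
    (pvDI items).getD day [] = pvPresent items day := by
  rw [pvDI, pv_di_getD _ _ _ (fun ip hip => hnd ip.2 (pv_enum_mem_snd items 0 ip hip))]
  rw [pvPresent]
  simp [PySem.Dict.getD_empty]

theorem pv_counts_eq (items : List (String × List (String × Int × Int)))
    (hnd : ∀ q ∈ items, (pvKeys q.2).Nodup)
    (a b : Int) (p q : String × List (String × Int × Int))
    (hap : (a, p) ∈ PySem.List.enumerate items 0) (hbq : (b, q) ∈ PySem.List.enumerate items 0)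
    (hab : a < b) :
    ((pvDI items).items.foldl
        (fun (counts : PySem.Dict (Int × Int) Int) dp => pvPairLoop items dp.1 counts dp.2)
        PySem.Dict.empty).getD (a, b) 0 = pvCnt p.2 q.2 := by
  have hKnd : (pvDI items).keys.Nodup := pv_di_nodup _ _ (by simp [PySem.Dict.keys_empty])
  have hitems : (pvDI items).items = (pvDI items).keys.map (fun k => (k, (pvDI items).getD k [])) :=
    PySem.Dict.items_eq_map_keys _ hKnd []
  rw [hitems, List.foldl_map]
  have hcongr : ∀ (c : PySem.Dict (Int × Int) Int), ∀ day ∈ (pvDI items).keys,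
      pvPairLoop items day c ((pvDI items).getD day []) = pvPairLoop items day c (pvPresent items day) := by
    intro c day _
    rw [pv_di_getD_present items day hnd]
  rw [PySem.List.foldl_congr_mem _ _ (fun c day => pvPairLoop items day c (pvPresent items day)) _ hcongr]
  rw [pv_counts_fold items (pvPresent items) _ a b hab
    (fun day _ => pv_present_pairwise items day) PySem.Dict.empty]
  rw [PySem.Dict.getD_empty]
  have hhit : ∀ day : String, pvHitAt items day a b = pvHit p.2 q.2 day := by
    intro day
    rw [pvHitAt, pv_enum_getD items (a, p) ("", []) hap, pv_enum_getD items (b, q) ("", []) hbq]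
  have hcong2 : (pvDI items).keys.countP
        (fun day => decide (a ∈ pvPresent items day ∧ b ∈ pvPresent items day ∧ pvHitAt items day a b = true))
      = (pvDI items).keys.countP
        (fun day => decide (day ∈ pvKeys p.2) && (decide (day ∈ pvKeys q.2) && pvHit p.2 q.2 day)) := by
    apply List.countP_congr
    intro day _
    simp only [decide_eq_true_eq, Bool.and_eq_true, decide_eq_true_eq]
    rw [pv_present_mem items day a p hap, pv_present_mem items day b q hbq, hhit day]
  rw [hcong2]
  have hpitems : p ∈ items := pv_enum_mem_snd items 0 (a, p) hap
  have htrans := pv_countP_transfer (pvDI items).keys (pvKeys p.2)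
    (fun day => decide (day ∈ pvKeys q.2) && pvHit p.2 q.2 day) hKnd (hnd p hpitems)
    (fun day hday => by
      have := pv_di_mem_keys (PySem.List.enumerate items) PySem.Dict.empty day
        (fun ip hip => hnd ip.2 (pv_enum_mem_snd items 0 ip hip)) (a, p) hap hday
      exact this)
  have hfin : List.countP (fun day => decide (day ∈ pvKeys q.2) && pvHit p.2 q.2 day) (pvKeys p.2)
      = List.countP (fun a => pvHit p.2 q.2 a && decide (a ∈ pvKeys q.2)) (pvKeys p.2) := by
    apply List.countP_congr
    intro day _
    simp only [Bool.and_eq_true]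
    tauto
  rw [htrans, pvCnt, List.countP_filter, hfin]
  omega

theorem pv_foldl_insert_filterMap (p : String × List (String × Int × Int))
    (l : List (String × List (String × Int × Int))) (d : PySem.Dict String Int) :
    l.foldl (fun d q => if pvCnt p.2 q.2 > 0 then d.insert (p.1 ++ "-" ++ q.1) (pvCnt p.2 q.2) else d) d
      = (l.filterMap (fun q => if pvCnt p.2 q.2 > 0 then some (p.1 ++ "-" ++ q.1, pvCnt p.2 q.2) else none)).foldl pvIns d := by
  induction l generalizing d with
  | nil => rfl
  | cons x t ih =>
    by_cases hx : pvCnt p.2 x.2 > 0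
    · simp only [List.foldl_cons, List.filterMap_cons, if_pos hx, ih, List.foldl_cons, pvIns]
    · simp only [List.foldl_cons, List.filterMap_cons, if_neg hx, ih]


theorem pv_emit_eq (counts : PySem.Dict (Int × Int) Int)
    (todo : List (Int × (String × List (String × Int × Int)))) (r : PySem.Dict String Int)
    (h : todo.Pairwise (fun x y => counts.getD (x.1, y.1) 0 = pvCnt x.2.2 y.2.2)) :
    pvEmit counts r todo = (pvSeq (todo.map (·.2))).foldl pvIns r := by
  induction todo generalizing r with
  | nil => rfl
  | cons ip t ih =>
    obtain ⟨hhead, htail⟩ := List.pairwise_cons.mp h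
    rw [pvEmit]
    simp only []
    rw [PySem.List.foldl_congr_mem _ _
      (fun (result : PySem.Dict String Int) (jq : Int × (String × List (String × Int × Int))) =>
        if pvCnt ip.2.2 jq.2.2 > 0 then result.insert (ip.2.1 ++ "-" ++ jq.2.1) (pvCnt ip.2.2 jq.2.2)
        else result) _
      (by
        intro acc jq hjq
        simp only []
        rw [hhead jq hjq])]
    rw [show (t.foldl
        (fun (result : PySem.Dict String Int) (jq : Int × (String × List (String × Int × Int))) =>
          if pvCnt ip.2.2 jq.2.2 > 0 then result.insert (ip.2.1 ++ "-" ++ jq.2.1) (pvCnt ip.2.2 jq.2.2)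
          else result) r)
      = ((t.map (·.2)).foldl
          (fun (result : PySem.Dict String Int) (q : String × List (String × Int × Int)) =>
            if pvCnt ip.2.2 q.2 > 0 then result.insert (ip.2.1 ++ "-" ++ q.1) (pvCnt ip.2.2 q.2)
            else result) r) from (List.foldl_map
            (f := fun (jq : Int × (String × List (String × Int × Int))) => jq.2)
            (g := fun (result : PySem.Dict String Int) (q : String × List (String × Int × Int)) =>
              if pvCnt ip.2.2 q.2 > 0 then result.insert (ip.2.1 ++ "-" ++ q.1) (pvCnt ip.2.2 q.2)
              else result)
            (l := t) (init := r)).symm]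
    rw [pv_foldl_insert_filterMap ip.2 (t.map (·.2)) r]
    rw [ih _ htail]
    show _ = (pvSeq (ip.2 :: t.map (·.2))).foldl pvIns r
    rw [pvSeq, List.foldl_append]

theorem pv_b_eq (fd : List (String × List (String × Int × Int)))
    (h2 : ∀ p ∈ fd, (p.2.map (·.1)).Nodup) :
    (pvEmit ((pvDI fd).items.foldl
        (fun (counts : PySem.Dict (Int × Int) Int) dp => pvPairLoop fd dp.1 counts dp.2)
        PySem.Dict.empty) PySem.Dict.empty (PySem.List.enumerate fd)).items
      = ((pvSeq fd).foldl pvIns PySem.Dict.empty).items := by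
  have hnd : ∀ q ∈ fd, (pvKeys q.2).Nodup := h2
  have hpw : (PySem.List.enumerate fd).Pairwise
      (fun x y => ((pvDI fd).items.foldl
          (fun (counts : PySem.Dict (Int × Int) Int) dp => pvPairLoop fd dp.1 counts dp.2)
          PySem.Dict.empty).getD (x.1, y.1) 0 = pvCnt x.2.2 y.2.2) := by
    rw [List.pairwise_iff_getElem]
    intro i j hi hj hij
    have hlt := List.pairwise_iff_getElem.mp (pv_enum_pairwise fd 0) i j hi hj hij
    have hmi : (PySem.List.enumerate fd)[i] ∈ PySem.List.enumerate fd := List.getElem_mem hi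
    have hmj : (PySem.List.enumerate fd)[j] ∈ PySem.List.enumerate fd := List.getElem_mem hj
    have := pv_counts_eq fd hnd (PySem.List.enumerate fd)[i].1 (PySem.List.enumerate fd)[j].1
      (PySem.List.enumerate fd)[i].2 (PySem.List.enumerate fd)[j].2
      (by simpa using hmi) (by simpa using hmj) hlt
    exact this
  rw [pv_emit_eq _ _ _ hpw, pv_enum_snd fd 0]

theorem pv_count_eq (d1 d2 : List (String × Int × Int)) (h : (pvKeys d1).Nodup) :
    (PySem.Set.inter (PySem.Set.ofList (PySem.Dict.mk d1).keys) (PySem.Set.ofList (PySem.Dict.mk d2).keys)).foldl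
      (fun (count : Int) (day : String) =>
        let se1 := (PySem.Dict.mk d1).getD day (0, 0)
        let se2 := (PySem.Dict.mk d2).getD day (0, 0)
        if se2.1 > se1.2 then count
        else if se2.2 < se1.1 then count
        else count + 1) 0 = pvCnt d1 d2 := by
  have hk : (PySem.Dict.mk d1).keys = pvKeys d1 := rfl
  have hk2 : (PySem.Dict.mk d2).keys = pvKeys d2 := rfl
  rw [PySem.Set.inter, hk, hk2, PySem.Set.ofList_eq_self_of_nodup _ h]
  have hfil : (pvKeys d1).filter (fun x => PySem.Set.contains (PySem.Set.ofList (pvKeys d2)) x)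
      = (pvKeys d1).filter (fun day => decide (day ∈ pvKeys d2)) := by
    apply List.filter_congr
    intro x _
    simp [PySem.Set.contains, PySem.Set.mem_ofList]
  rw [hfil]
  rw [PySem.List.foldl_congr_mem _ _
    (fun (count : Int) (day : String) => if pvHit d1 d2 day then count + 1 else count) _
    (by
      intro acc day _
      simp only [pvHit, decide_eq_true_eq, ge_iff_le, gt_iff_lt]
      split_ifs <;> omega)]
  rw [PySem.List.foldl_if_add_one]
  simp [pvCnt]

theorem pv_filter_visited (t s : List (String × List (String × Int × Int)))
    (p : String × List (String × Int × Int))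
    (h : ((t ++ p :: s).map (·.1)).Nodup) :
    (t ++ p :: s).filter (fun q => decide (¬ q.1 ∈ (t.map (·.1) ++ [p.1]))) = s := by
  simp only [List.map_append, List.map_cons, List.nodup_append, List.nodup_cons] at h
  rw [List.filter_append, List.filter_cons]
  have h1 : t.filter (fun q => decide (¬ q.1 ∈ (t.map (·.1) ++ [p.1]))) = [] := by
    rw [List.filter_eq_nil_iff]
    intro q hq
    simp only [decide_eq_true_eq, not_not, List.mem_append]
    exact Or.inl (List.mem_map_of_mem hq)
  have h2 : ¬ (decide (¬ p.1 ∈ (t.map (·.1) ++ [p.1])) = true) := by simp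
  have h3 : s.filter (fun q => decide (¬ q.1 ∈ (t.map (·.1) ++ [p.1]))) = s := by
    rw [List.filter_eq_self]
    intro q hq
    simp only [decide_eq_true_eq, List.mem_append, List.mem_singleton]
    rintro (hmem | heq)
    · exact h.2.2 _ hmem _ (List.mem_cons_of_mem _ (List.mem_map_of_mem hq)) rfl
    · exact h.2.1.1 (heq ▸ List.mem_map_of_mem hq)
  rw [h1, h3, if_neg h2]
  rfl

theorem pv_inner_eq (t s : List (String × List (String × Int × Int)))
    (p : String × List (String × Int × Int)) (d : PySem.Dict String Int)
    (h1 : (((t ++ p :: s)).map (·.1)).Nodup) (hp : (pvKeys p.2).Nodup) :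
    pvInnerA (t ++ p :: s) (t.map (·.1) ++ [p.1]) p d
      = (s.filterMap (fun q => if pvCnt p.2 q.2 > 0 then some (p.1 ++ "-" ++ q.1, pvCnt p.2 q.2) else none)).foldl pvIns d := by
  unfold pvInnerA
  rw [PySem.List.foldl_congr_mem _ _
    (fun (final : PySem.Dict String Int) (q : String × List (String × Int × Int)) =>
      if ¬ q.1 ∈ (t.map (·.1) ++ [p.1]) then
        (if pvCnt p.2 q.2 > 0 then final.insert (p.1 ++ "-" ++ q.1) (pvCnt p.2 q.2) else final)
      else final) _
    (by
      intro acc q _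
      by_cases hq : q.1 ∈ (t.map (·.1) ++ [p.1])
      · simp only [if_pos hq, if_neg (not_not_intro hq)]
      · simp only [if_neg hq, if_pos hq]
        rw [pv_count_eq p.2 q.2 hp])]
  rw [PySem.List.foldl_ite_eq_foldl_filter (fun (q : String × List (String × Int × Int)) => ¬ q.1 ∈ (t.map (·.1) ++ [p.1]))
    (fun (final : PySem.Dict String Int) (q : String × List (String × Int × Int)) =>
      if pvCnt p.2 q.2 > 0 then final.insert (p.1 ++ "-" ++ q.1) (pvCnt p.2 q.2) else final)
    (t ++ p :: s) d]
  rw [pv_filter_visited t s p h1]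
  exact pv_foldl_insert_filterMap p s d

theorem pv_outer (fd : List (String × List (String × Int × Int)))
    (h1 : (fd.map (·.1)).Nodup) (h2 : ∀ p ∈ fd, (p.2.map (·.1)).Nodup) :
    ∀ (s t : List (String × List (String × Int × Int))) (d : PySem.Dict String Int),
      fd = t ++ s →
      (s.foldl
        (fun (st : PySem.Dict String Int × List String) (p : String × List (String × Int × Int)) =>
          let visited := st.2 ++ [p.1]
          (pvInnerA fd visited p st.1, visited))
        (d, t.map (·.1))).1
      = (pvSeq s).foldl pvIns d := by
  intro s
  induction s with
  | nil => intro t d _; rfl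
  | cons p s' ih =>
    intro t d hfd
    rw [List.foldl_cons]
    simp only []
    have hmap : t.map (·.1) ++ [p.1] = (t ++ [p]).map (·.1) := by simp
    have hinner : pvInnerA fd (t.map (·.1) ++ [p.1]) p d
        = (s'.filterMap (fun q => if pvCnt p.2 q.2 > 0 then some (p.1 ++ "-" ++ q.1, pvCnt p.2 q.2) else none)).foldl pvIns d := by
      rw [hfd] at h1 ⊢
      exact pv_inner_eq t s' p d h1 (h2 p (by rw [hfd]; exact List.mem_append_right _ (List.mem_cons_self)))
    rw [hinner, hmap]
    rw [ih (t ++ [p]) _ (by rw [hfd, List.append_assoc]; rfl)]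
    show _ = (pvSeq (p :: s')).foldl pvIns d
    rw [pvSeq, List.foldl_append]

theorem pv_a_eq (fd : List (String × List (String × Int × Int)))
    (h1 : (fd.map (·.1)).Nodup) (h2 : ∀ p ∈ fd, (p.2.map (·.1)).Nodup) :
    final_comparison fd = ((pvSeq fd).foldl pvIns PySem.Dict.empty).items := by
  unfold final_comparison
  exact congrArg PySem.Dict.items (pv_outer fd h1 h2 fd [] PySem.Dict.empty rfl)

theorem pv_b_eq' (fd : List (String × List (String × Int × Int)))
    (h2 : ∀ p ∈ fd, (p.2.map (·.1)).Nodup) :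
    final_comparison_alt fd = ((pvSeq fd).foldl pvIns PySem.Dict.empty).items := by
  show (pvEmit ((pvDI fd).items.foldl
      (fun (counts : PySem.Dict (Int × Int) Int) dp => pvPairLoop fd dp.1 counts dp.2)
      PySem.Dict.empty) PySem.Dict.empty (PySem.List.enumerate fd)).items = _
  exact pv_b_eq fd h2

-- ===== VERDICT (by name: the statement is the Claim_ definition above) =====
theorem final_comparison_spec : Claim_equal_final_comparison := by
  intro fd _ hpre
  unfold Spec_final_comparison
  rw [pv_a_eq fd hpre.1 hpre.2, pv_b_eq' fd hpre.2]
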